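-- pv_equiv track=rewrite | github.com/HolmzPeng/zpeng | python/libs/kyo.py | countMonthDays
-- ===== SOURCE A (Python) =====
-- def isleap(year):
--     """
--     判断输入年是否闰年
--     是闰年返回True, 不是返回False
--     """
--     return 1 if year % 400 == 0 or year % 4 == 0 and year % 100 != 0 else 0
--
-- def countMonthDays(year, month):
--     """
--     计算1月到指定月的天数
--     """
--     #  days = (month - 1) * 30  + month // 2
--     #  days += 1 if month == 9 or month == 11 else 0
--     #  return days - 2 + isleap(year) if month > 2 else days
--
--     M = ((31, 28, 31, 30, 31, 30, 31, 31, 30, 31, 30, 31),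
--          (31, 29, 31, 30, 31, 30, 31, 31, 30, 31, 30, 31))[isleap(year)]
--
--     days = 0
--
--     while month > 1:
--         days += M[month - 2]
--         month -= 1
--
--     return days
-- ===== SOURCE B (Python) =====
-- def isleap(year):
--     return 1 if year % 400 == 0 or year % 4 == 0 and year % 100 != 0 else 0
--
-- CUM = ((0, 31, 59, 90, 120, 151, 181, 212, 243, 273, 304, 334, 365),
--        (0, 31, 60, 91, 121, 152, 182, 213, 244, 274, 305, 335, 366))
--
-- def countMonthDays(year, month):
--     if month < 1:
--         return 0
--     return CUM[isleap(year)][month - 1]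
-- ===== Notes on version B (the rewrite author's own statement) =====
-- stated objective: simpler
-- what changed: Replaces the month-by-month summing while-loop with a single lookup in a precomputed cumulative-days prefix table selected by leap-year status.
import Mathlib
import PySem

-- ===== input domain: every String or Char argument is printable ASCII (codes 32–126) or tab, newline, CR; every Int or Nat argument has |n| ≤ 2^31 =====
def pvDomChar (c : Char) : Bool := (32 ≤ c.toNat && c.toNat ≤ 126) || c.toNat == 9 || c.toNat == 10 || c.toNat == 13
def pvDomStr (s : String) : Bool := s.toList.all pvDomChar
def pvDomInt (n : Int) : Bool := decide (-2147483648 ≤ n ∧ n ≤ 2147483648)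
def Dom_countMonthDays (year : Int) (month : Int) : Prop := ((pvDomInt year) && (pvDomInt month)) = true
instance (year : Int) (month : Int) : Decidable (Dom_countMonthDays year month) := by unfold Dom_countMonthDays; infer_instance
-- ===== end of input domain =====

-- B replaces A's month-by-month summing while-loop with one lookup in a cumulative prefix table (simpler).

-- ===== PORT A =====
def isleap (year : Int) : Int :=
  if PySem.Int.mod year 400 = 0 ∨ (PySem.Int.mod year 4 = 0 ∧ PySem.Int.mod year 100 ≠ 0) then 1 else 0

-- the while loop of A: while month > 1: days += M[month-2]; month -= 1
def countMonthDaysLoop (M : List Int) (month : Int) (days : Int) : Int :=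
  if month > 1 then
    countMonthDaysLoop M (month - 1) (days + (PySem.List.pyGet? M (month - 2)).getD 0)
  else days
termination_by (month - 1).toNat
decreasing_by omega

def countMonthDays (year : Int) (month : Int) : Int :=
  let M : List Int :=
    (PySem.List.pyGet? [[31, 28, 31, 30, 31, 30, 31, 31, 30, 31, 30, 31],
                        [31, 29, 31, 30, 31, 30, 31, 31, 30, 31, 30, 31]] (isleap year)).getD []
  countMonthDaysLoop M month 0

-- ===== PORT B =====
def cumTable : List (List Int) :=
  [[0, 31, 59, 90, 120, 151, 181, 212, 243, 273, 304, 334, 365],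
   [0, 31, 60, 91, 121, 152, 182, 213, 244, 274, 305, 335, 366]]

def countMonthDays_alt (year : Int) (month : Int) : Int :=
  if month < 1 then 0
  else (PySem.List.pyGet? ((PySem.List.pyGet? cumTable (isleap year)).getD []) (month - 1)).getD 0

-- ===== PRECONDITION & SPEC =====
-- Pre_ excludes exactly month ≥ 14, where both A and B raise IndexError.
def Pre_countMonthDays (year : Int) (month : Int) : Prop := month ≤ 13
instance (year : Int) (month : Int) : Decidable (Pre_countMonthDays year month) := by unfold Pre_countMonthDays; infer_instance
def pvWitness_countMonthDays : Int × Int := (2024, 7)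

def Spec_countMonthDays (year : Int) (month : Int) (out : Int) : Prop := out = countMonthDays_alt year month
instance (year : Int) (month : Int) (out : Int) : Decidable (Spec_countMonthDays year month out) := by unfold Spec_countMonthDays; infer_instance

-- ===== CLAIM (what is proved, stated in full; the proofs are below) =====
def Claim_equal_countMonthDays : Prop := ∀ (year : Int) (month : Int), Dom_countMonthDays year month → Pre_countMonthDays year month → Spec_countMonthDays year month (countMonthDays year month)

-- ===== LEMMAS AND PROOFS =====

theorem isleap_cases (year : Int) : isleap year = 0 ∨ isleap year = 1 := by
  unfold isleap; split_ifs <;> simp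

theorem loop_base (M : List Int) (month days : Int) (h : ¬ month > 1) :
    countMonthDaysLoop M month days = days := by
  unfold countMonthDaysLoop; simp [h]

theorem loop_step (M : List Int) (month days : Int) (h : month > 1) :
    countMonthDaysLoop M month days
      = countMonthDaysLoop M (month - 1) (days + (PySem.List.pyGet? M (month - 2)).getD 0) := by
  rw [countMonthDaysLoop]; simp [h]

-- A's while loop starting at month = n+1 adds up the first n entries of M.
theorem loop_sum (M : List Int) : ∀ (n : Nat) (d : Int), n ≤ M.length →
    countMonthDaysLoop M ((n : Int) + 1) d = d + (M.take n).sum := by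
  intro n
  induction n with
  | zero => intro d _; rw [loop_base _ _ _ (by omega)]; simp
  | succ k ih =>
    intro d hk
    rw [loop_step _ _ _ (by push_cast; omega)]
    have e2 : ((k + 1 : Nat) : Int) + 1 - 2 = (k : Int) := by push_cast; ring
    have e1 : ((k + 1 : Nat) : Int) + 1 - 1 = (k : Int) + 1 := by push_cast; ring
    rw [e2, e1, PySem.List.pyGet?_natCast, ih _ (by omega)]
    have hk' : k < M.length := by omega
    have hsum := List.sum_take_succ M k hk'
    rw [List.getElem?_eq_getElem hk', Option.getD_some, hsum]
    ring

theorem sum_take_nonleap : ∀ n, n < 13 →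
    ((([31, 28, 31, 30, 31, 30, 31, 31, 30, 31, 30, 31] : List Int).take n).sum
      = ((([0, 31, 59, 90, 120, 151, 181, 212, 243, 273, 304, 334, 365] : List Int)[n]?).getD 0)) := by
  decide

theorem sum_take_leap : ∀ n, n < 13 →
    ((([31, 29, 31, 30, 31, 30, 31, 31, 30, 31, 30, 31] : List Int).take n).sum
      = ((([0, 31, 60, 91, 121, 152, 182, 213, 244, 274, 305, 335, 366] : List Int)[n]?).getD 0)) := by
  decide

-- ===== VERDICT (by name: the statement is the Claim_ definition above) =====
theorem countMonthDays_spec : Claim_equal_countMonthDays := by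
  intro year month _ hpre
  unfold Pre_countMonthDays at hpre
  unfold Spec_countMonthDays countMonthDays countMonthDays_alt cumTable
  by_cases hm : month < 1
  · rw [loop_base _ _ _ (by omega)]
    simp [hm]
  · obtain ⟨n, rfl⟩ : ∃ n : Nat, month = (n : Int) + 1 :=
      ⟨(month - 1).toNat, by omega⟩
    have hn13 : n < 13 := by omega
    have hn12 : n ≤ 12 := by omega
    have hnot : ¬ ((n : Int) + 1 < 1) := by omega
    have em : (n : Int) + 1 - 1 = (n : Int) := by ring
    rcases isleap_cases year with h | h
    · simp only [h]
      simp only [show (PySem.List.pyGet? ([[31, 28, 31, 30, 31, 30, 31, 31, 30, 31, 30, 31],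
            [31, 29, 31, 30, 31, 30, 31, 31, 30, 31, 30, 31]] : List (List Int)) (0 : Int)).getD []
            = ([31, 28, 31, 30, 31, 30, 31, 31, 30, 31, 30, 31] : List Int) from by decide]
      simp only [show (PySem.List.pyGet? ([[0, 31, 59, 90, 120, 151, 181, 212, 243, 273, 304, 334, 365],
            [0, 31, 60, 91, 121, 152, 182, 213, 244, 274, 305, 335, 366]] : List (List Int)) (0 : Int)).getD []
            = ([0, 31, 59, 90, 120, 151, 181, 212, 243, 273, 304, 334, 365] : List Int) from by decide]
      rw [loop_sum _ n 0 (by simpa using hn12), if_neg hnot, em, PySem.List.pyGet?_natCast,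
          ← sum_take_nonleap n hn13, zero_add]
    · simp only [h]
      simp only [show (PySem.List.pyGet? ([[31, 28, 31, 30, 31, 30, 31, 31, 30, 31, 30, 31],
            [31, 29, 31, 30, 31, 30, 31, 31, 30, 31, 30, 31]] : List (List Int)) (1 : Int)).getD []
            = ([31, 29, 31, 30, 31, 30, 31, 31, 30, 31, 30, 31] : List Int) from by decide]
      simp only [show (PySem.List.pyGet? ([[0, 31, 59, 90, 120, 151, 181, 212, 243, 273, 304, 334, 365],
            [0, 31, 60, 91, 121, 152, 182, 213, 244, 274, 305, 335, 366]] : List (List Int)) (1 : Int)).getD []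
            = ([0, 31, 60, 91, 121, 152, 182, 213, 244, 274, 305, 335, 366] : List Int) from by decide]
      rw [loop_sum _ n 0 (by simpa using hn12), if_neg hnot, em, PySem.List.pyGet?_natCast,
          ← sum_take_leap n hn13, zero_add]
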